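-- pv_equiv track=rewrite | github.com/mockingbyrd/Fall2016-Math-REU | FriedmanTest.py | getMinValueInList
-- ===== SOURCE A (Python) =====
-- def getMinValueInList(list):
--     """
--     finds the minimum value in a list, sets that minimum value to 1000 so the next min value can be found
--     :param list: list where minimum value is to be found
--     :return: minimum value in the list
--     """
--     minIndices = [0]
--     for index in range(1,len(list)):
--         if(list[index]<list[minIndices[0]]):
--             minIndices = [index]
--         elif(list[index]==list[minIndices[0]]):
--             minIndices.append(index)
--     for index in minIndices:
--         list[index] = 1000
--     return minIndices
-- ===== SOURCE B (Python) =====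
-- def getMinValueInList(list):
--     # First pass: index of the first minimum; then collect the later equal indices.
--     mi = 0
--     for i in range(1, len(list)):
--         if list[i] < list[mi]:
--             mi = i
--     v = list[mi]
--     res = [mi] + [i for i in range(mi + 1, len(list)) if list[i] == v]
--     for i in res:
--         list[i] = 1000
--     return res
-- ===== Notes on version B (the rewrite author's own statement) =====
-- stated objective: simpler
-- what changed: Replaces A's single pass that rebuilds/extends the whole index list with head lookups by a first pass tracking only the first minimum's index and a second pass (a comprehension) collecting the later indices equal to it.
-- outside the precondition, e.g. on getMinValueInList([]): A raises IndexError, B raises IndexError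
import Mathlib
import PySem

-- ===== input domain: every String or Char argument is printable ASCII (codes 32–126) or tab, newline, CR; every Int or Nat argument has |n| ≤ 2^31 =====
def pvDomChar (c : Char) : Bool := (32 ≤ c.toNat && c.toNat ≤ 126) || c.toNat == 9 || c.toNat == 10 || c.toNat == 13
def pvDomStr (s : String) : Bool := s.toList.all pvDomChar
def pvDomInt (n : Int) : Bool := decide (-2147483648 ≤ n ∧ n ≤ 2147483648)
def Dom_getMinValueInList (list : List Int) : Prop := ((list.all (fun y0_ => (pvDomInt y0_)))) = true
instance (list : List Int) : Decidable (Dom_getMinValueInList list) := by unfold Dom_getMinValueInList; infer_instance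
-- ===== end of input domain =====

-- B replaces A's single pass maintaining the whole index list by a first pass finding only the
-- first minimum's index and a second pass collecting the later equal indices (objective:
-- simpler decomposition). Both Pythons mutate the input (set the minimum entries to 1000);
-- the equivalence proved here is about the RETURN value only (B performs the same mutation).

-- ===== PORT A =====
def getMinValueInList (list : List Int) : List Int :=
  (PySem.List.pyRange 1 (list.length : Int) 1).foldl
    (fun mins index =>
      if PySem.List.pyGetD list index 0 < PySem.List.pyGetD list (PySem.List.pyGetD mins 0 0) 0 then
        [index]
      else if PySem.List.pyGetD list index 0 = PySem.List.pyGetD list (PySem.List.pyGetD mins 0 0) 0 then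
        mins ++ [index]
      else mins)
    [0]
  -- the second Python loop only mutates `list`; the returned value is minIndices

-- ===== PORT B =====
def getMinValueInList_alt (list : List Int) : List Int :=
  let mi := (PySem.List.pyRange 1 (list.length : Int) 1).foldl
    (fun mi i => if PySem.List.pyGetD list i 0 < PySem.List.pyGetD list mi 0 then i else mi) 0
  let v := PySem.List.pyGetD list mi 0
  mi :: (PySem.List.pyRange (mi + 1) (list.length : Int) 1).filter
    (fun i => PySem.List.pyGetD list i 0 = v)
  -- the final Python loop only mutates `list`; the returned value is res

-- ===== PRECONDITION & SPEC =====
-- Pre_ excludes exactly the empty list, on which A raises IndexError (list[0] = 1000).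
def Pre_getMinValueInList (list : List Int) : Prop := list.isEmpty = false
instance (list : List Int) : Decidable (Pre_getMinValueInList list) := by
  unfold Pre_getMinValueInList; infer_instance

def pvWitness_getMinValueInList : List Int := [3, 1, 4, 1]

def Spec_getMinValueInList (list : List Int) (out : List Int) : Prop := out = getMinValueInList_alt list
instance (list : List Int) (out : List Int) : Decidable (Spec_getMinValueInList list out) := by unfold Spec_getMinValueInList; infer_instance

-- ===== CLAIM (what is proved, stated in full; the proofs are below) =====
def Claim_equal_getMinValueInList : Prop := ∀ (list : List Int), Dom_getMinValueInList list → Pre_getMinValueInList list → Spec_getMinValueInList list (getMinValueInList list)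

-- ===== LEMMAS AND PROOFS =====

-- Joint invariant for the two folds over range(1, 1+k): A's state equals B's first-min index
-- followed by the later equal indices, the index is in range, and it attains the minimum.
theorem pv_inv (xs : List Int) (k : Nat) :
    let g := fun i => PySem.List.pyGetD xs i 0
    let m := (PySem.List.pyRange 1 (1 + (k : Int)) 1).foldl
      (fun mi i => if g i < g mi then i else mi) 0
    ((PySem.List.pyRange 1 (1 + (k : Int)) 1).foldl
      (fun mins index =>
        if g index < g (PySem.List.pyGetD mins 0 0) then [index]
        else if g index = g (PySem.List.pyGetD mins 0 0) then mins ++ [index]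
        else mins) [0]
      = m :: (PySem.List.pyRange (m + 1) (1 + (k : Int)) 1).filter (fun i => g i = g m))
    ∧ 0 ≤ m ∧ m < 1 + (k : Int)
    ∧ (∀ i : Int, 0 ≤ i → i < 1 + (k : Int) → g m ≤ g i) := by
  intro g
  induction k with
  | zero =>
      rw [PySem.List.pyRange_one_eq_nil (by omega : (1 : Int) + ((0:Nat):Int) ≤ 1)]
      simp
      intro i h1 h2
      have : i = 0 := by omega
      simp [this]
  | succ k ih =>
      obtain ⟨hA, hm0, hmk, hmin⟩ := ih
      set m := (PySem.List.pyRange 1 (1 + (k : Int)) 1).foldl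
        (fun mi i => if g i < g mi then i else mi) 0 with hmdef
      have hrange : PySem.List.pyRange 1 (1 + ((k + 1 : Nat) : Int)) 1
          = PySem.List.pyRange 1 (1 + (k : Int)) 1 ++ [1 + (k : Int)] := by
        have : (1 : Int) + ((k + 1 : Nat) : Int) = (1 + (k : Int)) + 1 := by push_cast; ring
        rw [this, PySem.List.pyRange_one_succ_right (by omega)]
      rw [hrange]
      simp only [List.foldl_append, List.foldl_cons, List.foldl_nil, hA, ← hmdef]
      have hhead : PySem.List.pyGetD (m :: (PySem.List.pyRange (m + 1) (1 + (k : Int)) 1).filter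
          (fun i => g i = g m)) 0 0 = m := by
        simp [PySem.List.pyGetD, PySem.List.pyGet?, PySem.List.pyIdx?]
      rw [hhead]
      by_cases hlt : g (1 + (k : Int)) < g m
      · simp only [if_pos hlt]
        refine ⟨?_, by omega, by push_cast; omega, ?_⟩
        · simp only [List.cons.injEq, true_and]
          rw [PySem.List.pyRange_one_eq_nil (by push_cast; omega)]
          simp
        · intro i h1 h2
          push_cast at h2
          by_cases hik : i < 1 + (k : Int)
          · exact le_of_lt (lt_of_lt_of_le hlt (hmin i h1 hik))
          · have : i = 1 + (k : Int) := by omega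
            simp [this]
      · simp only [if_neg hlt]
        have hfilt : PySem.List.pyRange (m + 1) (1 + ((k + 1 : Nat) : Int)) 1
            = PySem.List.pyRange (m + 1) (1 + (k : Int)) 1 ++ [1 + (k : Int)] := by
          have : (1 : Int) + ((k + 1 : Nat) : Int) = (1 + (k : Int)) + 1 := by push_cast; ring
          rw [this, PySem.List.pyRange_one_succ_right (by omega)]
        have hmin' : ∀ i : Int, 0 ≤ i → i < 1 + ((k + 1 : Nat) : Int) → g m ≤ g i := by
          intro i h1 h2
          push_cast at h2
          by_cases hik : i < 1 + (k : Int)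
          · exact hmin i h1 hik
          · have : i = 1 + (k : Int) := by omega
            rw [this]; exact le_of_not_gt hlt
        by_cases heq : g (1 + (k : Int)) = g m
        · simp only [if_pos heq]
          refine ⟨?_, hm0, by push_cast; omega, hmin'⟩
          rw [hfilt]
          simp [heq]
        · simp only [if_neg heq]
          refine ⟨?_, hm0, by push_cast; omega, hmin'⟩
          rw [hfilt]
          simp [heq]

-- ===== VERDICT (by name: the statement is the Claim_ definition above) =====
theorem getMinValueInList_spec : Claim_equal_getMinValueInList := by
  intro xs _ hpre
  unfold Spec_getMinValueInList getMinValueInList getMinValueInList_alt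
  obtain ⟨a, t, rfl⟩ : ∃ a t, xs = a :: t := by
    cases xs with
    | nil => simp [Pre_getMinValueInList] at hpre
    | cons a t => exact ⟨a, t, rfl⟩
  have hlen : (((a :: t).length : Nat) : Int) = 1 + (t.length : Int) := by
    simp [List.length_cons]; omega
  have := pv_inv (a :: t) t.length
  simp only [] at this
  simp only [hlen]
  exact this.1
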